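-- pv_equiv track=rewrite | github.com/LimonAga/Turkish_Chekers | main.py | get_longest_captures
-- ===== SOURCE A (Python) =====
-- def get_longest_captures(moves):
--     '''Returns the longest captures.'''
--     return_list = []
--     longest_move = 1
--     for move in moves:
--         if len(move) > longest_move:
--             longest_move = len(move)
--
--     for move in moves:
--         if len(move) == longest_move:
--             return_list.append(move)
--
--     return return_list
-- ===== SOURCE B (Python) =====
-- def get_longest_captures(moves):
--     '''Returns the longest captures.'''
--     longest = 1
--     best = []
--     for move in moves:
--         n = len(move)
--         if n > longest:
--             longest = n
--             best = [move]
--         elif n == longest: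
--             best.append(move)
--     return best
-- ===== Notes on version B (the rewrite author's own statement) =====
-- stated objective: alternative
-- what changed: Replaces A's two passes (max-length scan then filter scan) with a single pass that tracks the current maximum length and resets/extends the result list as it goes.
import Mathlib
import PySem

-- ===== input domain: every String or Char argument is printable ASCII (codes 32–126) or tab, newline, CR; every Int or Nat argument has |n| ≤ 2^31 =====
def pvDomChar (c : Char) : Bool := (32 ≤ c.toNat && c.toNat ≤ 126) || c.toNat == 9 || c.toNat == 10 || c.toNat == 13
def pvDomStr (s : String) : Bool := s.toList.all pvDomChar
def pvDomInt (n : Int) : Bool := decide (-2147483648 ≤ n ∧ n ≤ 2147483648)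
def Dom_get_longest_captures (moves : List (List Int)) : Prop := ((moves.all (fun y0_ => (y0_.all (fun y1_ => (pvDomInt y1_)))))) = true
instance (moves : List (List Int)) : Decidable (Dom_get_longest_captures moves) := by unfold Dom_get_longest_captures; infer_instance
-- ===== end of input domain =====

-- B replaces A's two passes (max scan + filter scan) with a single pass keeping (current max, current best list); return values proved equal.
-- ===== PORT A =====
def get_longest_captures (moves : List (List Int)) : List (List Int) :=
  let longest_move : Int :=
    moves.foldl (fun lm move => if (move.length : Int) > lm then (move.length : Int) else lm) 1
  moves.foldl (fun rl move => if (move.length : Int) = longest_move then rl ++ [move] else rl) []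

-- ===== PORT B =====
def get_longest_captures_alt (moves : List (List Int)) : List (List Int) :=
  (moves.foldl
    (fun (st : Int × List (List Int)) move =>
      let n : Int := move.length
      if n > st.1 then (n, [move])
      else if n = st.1 then (st.1, st.2 ++ [move])
      else st)
    (1, [])).2

-- ===== PRECONDITION & SPEC =====
def Spec_get_longest_captures (moves : List (List Int)) (out : List (List Int)) : Prop := out = get_longest_captures_alt moves
instance (moves : List (List Int)) (out : List (List Int)) : Decidable (Spec_get_longest_captures moves out) := by unfold Spec_get_longest_captures; infer_instance

-- ===== CLAIM (what is proved, stated in full; the proofs are below) =====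
def Claim_equal_get_longest_captures : Prop := ∀ (moves : List (List Int)), Dom_get_longest_captures moves → Spec_get_longest_captures moves (get_longest_captures moves)

-- ===== LEMMAS AND PROOFS =====
def pvMaxFold (moves : List (List Int)) (L : Int) : Int :=
  moves.foldl (fun lm move => if (move.length : Int) > lm then (move.length : Int) else lm) L

theorem pvMaxFold_le (moves : List (List Int)) (L : Int) : L ≤ pvMaxFold moves L := by
  induction moves generalizing L with
  | nil => simp [pvMaxFold]
  | cons m ms ih =>
    simp only [pvMaxFold, List.foldl_cons]
    split_ifs with h
    · exact le_trans (le_of_lt h) (ih _)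
    · exact ih L

theorem pvB_invariant (moves : List (List Int)) (L : Int) (acc : List (List Int)) :
    moves.foldl
      (fun (st : Int × List (List Int)) move =>
        let n : Int := move.length
        if n > st.1 then (n, [move])
        else if n = st.1 then (st.1, st.2 ++ [move])
        else st)
      (L, acc)
    = (pvMaxFold moves L,
       (if L < pvMaxFold moves L then [] else acc)
         ++ moves.filter (fun m => (m.length : Int) = pvMaxFold moves L)) := by
  induction moves generalizing L acc with
  | nil => simp [pvMaxFold]
  | cons m ms ih =>
    simp only [List.foldl_cons]
    by_cases h1 : (m.length : Int) > L
    · simp only [h1, if_pos]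
      rw [ih]
      have hM : pvMaxFold (m :: ms) L = pvMaxFold ms (m.length : Int) := by
        simp [pvMaxFold, h1]
      have hle : (m.length : Int) ≤ pvMaxFold ms (m.length : Int) := pvMaxFold_le _ _
      rw [hM]
      by_cases h2 : (m.length : Int) < pvMaxFold ms (m.length : Int)
      · have hne : ¬ ((m.length : Int) = pvMaxFold ms (m.length : Int)) := ne_of_lt h2
        simp [h2, h1.trans h2, List.filter, hne]
      · have heq : (m.length : Int) = pvMaxFold ms (m.length : Int) := le_antisymm hle (not_lt.mp h2)
        simp [h2, h1, List.filter, heq.symm, ← heq]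
    · have hM : pvMaxFold (m :: ms) L = pvMaxFold ms L := by
        simp [pvMaxFold, h1]
      have hLle : L ≤ pvMaxFold ms L := pvMaxFold_le _ _
      by_cases h2 : (m.length : Int) = L
      · simp only [h1, if_neg, if_pos h2] at *
        rw [ih, hM]
        by_cases h3 : L < pvMaxFold ms L
        · have hne : ¬ ((m.length : Int) = pvMaxFold ms L) := by rw [h2]; exact ne_of_lt h3
          simp [h3, List.filter, hne]
        · have heq : L = pvMaxFold ms L := le_antisymm hLle (not_lt.mp h3)
          have hme : (m.length : Int) = pvMaxFold ms L := h2.trans heq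
          simp [h3, List.filter, hme, List.append_assoc]
      · simp only [h1, if_neg h2]
        rw [ih, hM]
        have hne : ¬ ((m.length : Int) = pvMaxFold ms L) := by
          intro hc
          have : (m.length : Int) ≤ L := not_lt.mp h1
          rcases lt_or_eq_of_le hLle with h3 | h3
          · exact absurd (hc ▸ h3) (not_lt.mpr this)
          · exact h2 (hc.trans h3.symm)
        simp [List.filter, hne]

-- ===== VERDICT (by name: the statement is the Claim_ definition above) =====
theorem get_longest_captures_spec : Claim_equal_get_longest_captures := by
  intro moves _
  unfold Spec_get_longest_captures get_longest_captures get_longest_captures_alt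
  rw [pvB_invariant]
  simp only []
  rw [PySem.List.foldl_append_ite_eq_filter]
  simp [pvMaxFold]
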